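-- pv_equiv track=rewrite | github.com/ChanHoLee275/programmers-coding-test-practice | level2/n2-배열-자르기.py | solution
-- ===== SOURCE A (Python) =====
-- def solution(n, left, right):
--     answer = []
--     row_left = left // n
--     row_right = right // n
--     column_left = left % n
--     column_right = right % n
--
--     if row_left == row_right:
--         for i in range(column_left, column_right + 1):
--             if i >= row_left:
--                 answer.append(i+1)
--             else:
--                 answer.append(row_left + 1)
--         return answer
--
--     for i in range(column_left, n):
--         if i >= row_left:
--             answer.append(i + 1)
--         else:
--             answer.append(row_left + 1)
--     for i in range(row_left + 1, row_right):
--         for j in range(n):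
--             if i >= j:
--                 answer.append(i + 1)
--             else:
--                 answer.append(j + 1)
--     for i in range(0, column_right + 1):
--         if i >= row_right:
--             answer.append(i + 1)
--         else:
--             answer.append(row_right + 1)
--     return answer
-- ===== SOURCE B (Python) =====
-- def solution(n, left, right):
--     return [max(k // n, k % n) + 1 for k in range(left, right + 1)]
-- ===== Notes on version B (the rewrite author's own statement) =====
-- stated objective: simpler
-- what changed: A's three-section decomposition (first partial row, nested double loop over full middle rows, last partial row) is replaced by a single flat pass k = left..right computing each cell directly as max(k//n, k%n) + 1.
-- intended difference: On empty backwards slices that cross a row boundary (right < left with right//n < left//n), A still returns leftover cells of its first- and last-row sections (e.g. (2,3,1) -> [2,1,2]) while B returns [], the intended value of an empty slice. — e.g. on solution(2, 3, 1): A returns [2, 1, 2], B returns []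
-- outside the precondition, e.g. on solution(-2, 0, 3): A returns [], B returns [1, 0, 1, 0]; on solution(-2, 5, 2): A returns [1], B returns []; on solution(0, 0, 1): A raises ZeroDivisionError, B raises ZeroDivisionError
import Mathlib
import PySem

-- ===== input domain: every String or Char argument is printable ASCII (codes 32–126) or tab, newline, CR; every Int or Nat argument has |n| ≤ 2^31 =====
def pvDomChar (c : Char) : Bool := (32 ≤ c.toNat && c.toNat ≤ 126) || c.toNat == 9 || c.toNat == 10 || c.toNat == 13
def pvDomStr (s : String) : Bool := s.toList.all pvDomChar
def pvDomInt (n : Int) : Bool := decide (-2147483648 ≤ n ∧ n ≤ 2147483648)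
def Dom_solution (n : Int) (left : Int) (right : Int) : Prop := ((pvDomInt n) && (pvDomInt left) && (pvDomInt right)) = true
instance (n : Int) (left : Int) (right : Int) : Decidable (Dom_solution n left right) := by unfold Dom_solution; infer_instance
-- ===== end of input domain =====

-- B replaces A's three-section structure (first partial row, nested loop over
-- middle rows, last partial row) by one flat pass computing max(k//n, k%n)+1
-- per flat index k; objective: simpler.

-- ===== PORT A =====
def solution (n : Int) (left : Int) (right : Int) : List Int :=
  let row_left := PySem.Int.floordiv left n
  let row_right := PySem.Int.floordiv right n
  let column_left := PySem.Int.mod left n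
  let column_right := PySem.Int.mod right n
  if row_left = row_right then
    (PySem.List.pyRange column_left (column_right + 1) 1).foldl
      (fun answer i => if i ≥ row_left then answer ++ [i + 1] else answer ++ [row_left + 1]) []
  else
    let a1 := (PySem.List.pyRange column_left n 1).foldl
      (fun answer i => if i ≥ row_left then answer ++ [i + 1] else answer ++ [row_left + 1]) []
    let a2 := (PySem.List.pyRange (row_left + 1) row_right 1).foldl
      (fun answer i => (PySem.List.pyRange 0 n 1).foldl
        (fun answer j => if i ≥ j then answer ++ [i + 1] else answer ++ [j + 1]) answer) a1
    (PySem.List.pyRange 0 (column_right + 1) 1).foldl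
      (fun answer i => if i ≥ row_right then answer ++ [i + 1] else answer ++ [row_right + 1]) a2

-- ===== PORT B =====
def solution_alt (n : Int) (left : Int) (right : Int) : List Int :=
  (PySem.List.pyRange left (right + 1) 1).map
    (fun k => max (PySem.Int.floordiv k n) (PySem.Int.mod k n) + 1)

-- ===== PRECONDITION & SPEC =====
-- The task's natural domain is n ≥ 1 (an n×n grid): at n = 0 A raises
-- ZeroDivisionError, and for n < 0 no grid exists and both programs return
-- degenerate accidents; Pre_ keeps, besides all of n ≥ 1, the n < 0 inputs
-- on which the two accidents provably coincide (left//n = right//n, where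
-- both emit the same single row span, or right < left with right % n ≠ 0,
-- where both are empty), and excludes the remaining n ≤ 0 inputs, where the
-- degenerate outputs disagree (or A raises).
def Pre_solution (n : Int) (left : Int) (right : Int) : Prop :=
  0 < n ∨ (n < 0 ∧ (PySem.Int.floordiv left n = PySem.Int.floordiv right n ∨
    (right < left ∧ PySem.Int.mod right n ≠ 0)))
instance (n : Int) (left : Int) (right : Int) : Decidable (Pre_solution n left right) := by unfold Pre_solution; infer_instance
def pvWitness_solution : Int × Int × Int := (3, 2, 5)

-- When the requested slice is empty but spans backwards across a row boundary
-- (right < left with right//n < left//n), A still emits the tail of its first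
-- row and the head of its last row (leftover of its three-section structure),
-- while B returns [], the intended value of an empty slice.
def D_solution (n : Int) (left : Int) (right : Int) : Prop :=
  right < left ∧ PySem.Int.floordiv right n < PySem.Int.floordiv left n
instance (n : Int) (left : Int) (right : Int) : Decidable (D_solution n left right) := by unfold D_solution; infer_instance

def Spec_solution (n : Int) (left : Int) (right : Int) (out : List Int) : Prop := ¬ D_solution n left right → out = solution_alt n left right
instance (n : Int) (left : Int) (right : Int) (out : List Int) : Decidable (Spec_solution n left right out) := by unfold Spec_solution; infer_instance

def pvDiffWitness_solution : Int × Int × Int := (2, 3, 1)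
def pvDiffWitnessOut_solution : (List Int) × (List Int) := ([2, 1, 2], [])

-- ===== CLAIM (what is proved, stated in full; the proofs are below) =====
def Claim_unchanged_solution : Prop := ∀ (n : Int) (left : Int) (right : Int), Dom_solution n left right → Pre_solution n left right → Spec_solution n left right (solution n left right)
def Claim_changed_solution : Prop := Dom_solution (pvDiffWitness_solution.1) (pvDiffWitness_solution.2.1) (pvDiffWitness_solution.2.2) ∧ Pre_solution (pvDiffWitness_solution.1) (pvDiffWitness_solution.2.1) (pvDiffWitness_solution.2.2) ∧ D_solution (pvDiffWitness_solution.1) (pvDiffWitness_solution.2.1) (pvDiffWitness_solution.2.2) ∧ solution (pvDiffWitness_solution.1) (pvDiffWitness_solution.2.1) (pvDiffWitness_solution.2.2) = pvDiffWitnessOut_solution.1 ∧ solution_alt (pvDiffWitness_solution.1) (pvDiffWitness_solution.2.1) (pvDiffWitness_solution.2.2) = pvDiffWitnessOut_solution.2 ∧ pvDiffWitnessOut_solution.1 ≠ pvDiffWitnessOut_solution.2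
def Claim_exact_solution : Prop := ∀ (n : Int) (left : Int) (right : Int), Dom_solution n left right → Pre_solution n left right → D_solution n left right → solution n left right ≠ solution_alt n left right

-- ===== LEMMAS AND PROOFS =====

-- B's per-cell function (floordiv/mod rewritten to ediv/emod, valid for 0 < n).
def gfun (n k : Int) : Int := max (k / n) (k % n) + 1
-- A's per-cell function in row r at column i.
def hfun (r i : Int) : Int := if i ≥ r then i + 1 else r + 1

theorem foldA (l : List Int) (r : Int) (acc : List Int) :
    l.foldl (fun answer i => if i ≥ r then answer ++ [i + 1] else answer ++ [r + 1]) acc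
      = acc ++ l.map (hfun r) := by
  induction l generalizing acc with
  | nil => simp
  | cons x xs ih =>
    simp only [List.foldl_cons, ih, List.map_cons, hfun]
    split <;> simp

theorem foldB (l : List Int) (i : Int) (acc : List Int) :
    l.foldl (fun answer j => if i ≥ j then answer ++ [i + 1] else answer ++ [j + 1]) acc
      = acc ++ l.map (hfun i) := by
  induction l generalizing acc with
  | nil => simp
  | cons x xs ih =>
    simp only [List.foldl_cons, ih, List.map_cons, hfun]
    split_ifs <;> simp <;> omega

theorem cell (n r a : Int) (hn : 0 < n) (h0 : 0 ≤ a) (hb : a < n) :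
    gfun n (r * n + a) = hfun r a := by
  have h1 : (r * n + a) / n = r := by
    rw [add_comm, Int.add_mul_ediv_right _ _ (by omega : n ≠ 0),
        Int.ediv_eq_zero_of_lt h0 hb, zero_add]
  have h2 : (r * n + a) % n = a := by
    rw [add_comm, mul_comm r n, Int.add_mul_emod_self_left, Int.emod_eq_of_lt h0 hb]
  simp only [gfun, hfun, h1, h2]
  rcases le_total r a with h | h
  · rw [max_eq_right h, if_pos h]
  · rw [max_eq_left h]; split <;> omega

theorem chunk_aux (n r : Int) (hn : 0 < n) : ∀ (m : Nat) (a b : Int), m = (b - a).toNat →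
    0 ≤ a → b ≤ n →
    (PySem.List.pyRange (r * n + a) (r * n + b) 1).map (gfun n)
      = (PySem.List.pyRange a b 1).map (hfun r) := by
  intro m
  induction m with
  | zero =>
    intro a b hm h0 hb
    have hba : b ≤ a := by omega
    rw [PySem.List.pyRange_one_eq_nil hba,
        PySem.List.pyRange_one_eq_nil (by linarith : r * n + b ≤ r * n + a)]
    rfl
  | succ m ih =>
    intro a b hm h0 hb
    have hab : a < b := by omega
    rw [PySem.List.pyRange_one_cons hab,
        PySem.List.pyRange_one_cons (by linarith : r * n + a < r * n + b)]
    simp only [List.map_cons]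
    rw [cell n r a hn h0 (by omega)]
    congr 1
    have := ih (a + 1) b (by omega) (by omega) hb
    rwa [show r * n + (a + 1) = r * n + a + 1 from by ring] at this

theorem chunk (n r a b : Int) (hn : 0 < n) (h0 : 0 ≤ a) (hb : b ≤ n) :
    (PySem.List.pyRange (r * n + a) (r * n + b) 1).map (gfun n)
      = (PySem.List.pyRange a b 1).map (hfun r) :=
  chunk_aux n r hn (b - a).toNat a b rfl h0 hb

theorem rows (n : Int) (hn : 0 < n) : ∀ (m : Nat) (s t : Int) (acc : List Int), m = (t - s).toNat →
    (PySem.List.pyRange s t 1).foldl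
      (fun answer i => (PySem.List.pyRange 0 n 1).foldl
        (fun answer j => if i ≥ j then answer ++ [i + 1] else answer ++ [j + 1]) answer) acc
      = acc ++ (PySem.List.pyRange (s * n) (t * n) 1).map (gfun n) := by
  intro m
  induction m with
  | zero =>
    intro s t acc hm
    have hts : t ≤ s := by omega
    rw [PySem.List.pyRange_one_eq_nil hts,
        PySem.List.pyRange_one_eq_nil (mul_le_mul_of_nonneg_right hts hn.le)]
    simp
  | succ m ih =>
    intro s t acc hm
    have hst : s < t := by omega
    rw [PySem.List.pyRange_one_cons hst]
    simp only [List.foldl_cons]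
    rw [foldB, ih (s + 1) t _ (by omega),
        PySem.List.pyRange_one_append (s * n) ((s + 1) * n) (t * n)
          (by nlinarith) (mul_le_mul_of_nonneg_right (by omega) hn.le),
        List.map_append, ← List.append_assoc]
    congr 2
    have := chunk n s 0 n hn le_rfl le_rfl
    rw [add_zero] at this
    rw [show (s + 1) * n = s * n + n from by ring, this]

theorem solution_eq (n left right : Int) (hn : 0 < n) (hrlrr : left / n ≤ right / n) :
    solution n left right = solution_alt n left right := by
  unfold solution solution_alt
  simp only [PySem.Int.floordiv_eq_ediv_of_pos hn, PySem.Int.mod_eq_emod_of_pos hn]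
  have hcl0 : 0 ≤ left % n := Int.emod_nonneg _ (ne_of_gt hn)
  have hcln : left % n < n := Int.emod_lt_of_pos _ hn
  have hcr0 : 0 ≤ right % n := Int.emod_nonneg _ (ne_of_gt hn)
  have hcrn : right % n < n := Int.emod_lt_of_pos _ hn
  have hleft : left / n * n + left % n = left := by
    rw [mul_comm]; exact Int.mul_ediv_add_emod left n
  have hright : right / n * n + right % n = right := by
    rw [mul_comm]; exact Int.mul_ediv_add_emod right n
  have hB : (fun k : Int => max (k / n) (k % n) + 1) = gfun n := rfl
  rw [hB]
  by_cases hcase : left / n = right / n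
  · rw [if_pos hcase, foldA, List.nil_append]
    have := chunk n (left / n) (left % n) (right % n + 1) hn hcl0 (by omega)
    rw [show left / n * n + left % n = left from hleft,
        show left / n * n + (right % n + 1) = right + 1 from by rw [hcase]; omega] at this
    exact this.symm
  · rw [if_neg hcase, foldA, rows n hn (right / n - (left / n + 1)).toNat _ _ _ rfl, foldA, List.nil_append]
    have hrl_lt : left / n < right / n := lt_of_le_of_ne hrlrr hcase
    -- split B's flat range into the three sections
    have h1 : left ≤ (left / n + 1) * n := by nlinarith
    have h2 : (left / n + 1) * n ≤ right / n * n := mul_le_mul_of_nonneg_right (by omega) hn.le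
    have h3 : right / n * n ≤ right + 1 := by omega
    rw [PySem.List.pyRange_one_append left ((left / n + 1) * n) (right + 1) h1 (le_trans h2 h3),
        PySem.List.pyRange_one_append ((left / n + 1) * n) (right / n * n) (right + 1) h2 h3,
        List.map_append, List.map_append, List.append_assoc]
    congr 1
    · have := chunk n (left / n) (left % n) n hn hcl0 le_rfl
      rw [show left / n * n + left % n = left from hleft,
          show left / n * n + n = (left / n + 1) * n from by ring] at this
      exact this.symm
    · congr 1
      have := chunk n (right / n) 0 (right % n + 1) hn le_rfl (by omega)
      rw [add_zero, show right / n * n + (right % n + 1) = right + 1 from by omega] at this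
      exact this.symm

theorem foldl_acc (l : List Int) (acc : List Int) :
    List.foldl (fun (a : List Int) (_ : Int) => a) acc l = acc := by
  induction l generalizing acc with
  | nil => rfl
  | cons x xs ih => simpa [List.foldl_cons] using ih _

theorem solution_eq_neg (n left right : Int) (hn : n < 0) (hlr : right < left)
    (hm : PySem.Int.mod right n ≠ 0) : solution n left right = solution_alt n left right := by
  have h1 := PySem.Int.floordiv_mul_add_mod left n
  have h2 := PySem.Int.floordiv_mul_add_mod right n
  have hb1 := PySem.Int.mod_neg_bounds (a := left) hn
  have hb2 := PySem.Int.mod_neg_bounds (a := right) hn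
  simp only [solution, solution_alt]
  rw [PySem.List.pyRange_one_eq_nil (by omega : right + 1 ≤ left), List.map_nil]
  by_cases hc : PySem.Int.floordiv left n = PySem.Int.floordiv right n
  · rw [if_pos hc, foldA, List.nil_append]
    rw [hc] at h1
    rw [PySem.List.pyRange_one_eq_nil (by linarith : PySem.Int.mod right n + 1 ≤ PySem.Int.mod left n),
        List.map_nil]
  · rw [if_neg hc]
    have e1 : PySem.List.pyRange (PySem.Int.mod left n) n 1 = [] :=
      PySem.List.pyRange_one_eq_nil (by omega)
    have e2 : PySem.List.pyRange 0 n 1 = [] :=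
      PySem.List.pyRange_one_eq_nil hn.le
    have e3 : PySem.List.pyRange 0 (PySem.Int.mod right n + 1) 1 = [] :=
      PySem.List.pyRange_one_eq_nil (by omega)
    simp only [e1, e2, e3, List.foldl_nil]
    exact foldl_acc _ _

theorem floordiv_anti {n a b : Int} (hn : n < 0) (h : a ≤ b) :
    PySem.Int.floordiv b n ≤ PySem.Int.floordiv a n := by
  rw [← PySem.Int.floordiv_neg_neg a n, ← PySem.Int.floordiv_neg_neg b n,
      PySem.Int.floordiv_eq_ediv_of_pos (by omega : (0:Int) < -n),
      PySem.Int.floordiv_eq_ediv_of_pos (by omega : (0:Int) < -n)]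
  exact Int.ediv_le_ediv (by omega) (by omega)

theorem mod_of_fd {n k r : Int} (h : PySem.Int.floordiv k n = r) :
    PySem.Int.mod k n = k - r * n := by
  have hx := PySem.Int.floordiv_mul_add_mod k n
  rw [h] at hx
  linarith

theorem span_neg (n r : Int) (hn : n < 0) : ∀ (m : Nat) (lo hi : Int), m = (hi + 1 - lo).toNat →
    PySem.Int.floordiv lo n = r → PySem.Int.floordiv hi n = r →
    (PySem.List.pyRange lo (hi + 1) 1).map (fun k => max (PySem.Int.floordiv k n) (PySem.Int.mod k n) + 1)
      = (PySem.List.pyRange (PySem.Int.mod lo n) (PySem.Int.mod hi n + 1) 1).map (hfun r) := by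
  intro m
  induction m with
  | zero =>
    intro lo hi hm hl hr
    have e1 := mod_of_fd hl
    have e2 := mod_of_fd hr
    rw [PySem.List.pyRange_one_eq_nil (by omega : hi + 1 ≤ lo),
        PySem.List.pyRange_one_eq_nil (by omega : PySem.Int.mod hi n + 1 ≤ PySem.Int.mod lo n)]
    rfl
  | succ m ih =>
    intro lo hi hm hl hr
    have e1 := mod_of_fd hl
    have e2 := mod_of_fd hr
    rw [PySem.List.pyRange_one_cons (by omega : lo < hi + 1),
        PySem.List.pyRange_one_cons (by omega : PySem.Int.mod lo n < PySem.Int.mod hi n + 1)]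
    simp only [List.map_cons]
    congr 1
    · simp only [hfun, hl]
      split_ifs <;> omega
    · by_cases hlo : lo = hi
      · subst hlo
        rw [PySem.List.pyRange_one_eq_nil (by omega : lo + 1 ≤ lo + 1),
            PySem.List.pyRange_one_eq_nil (by omega : PySem.Int.mod lo n + 1 ≤ PySem.Int.mod lo n + 1)]
        rfl
      · have hfd : PySem.Int.floordiv (lo + 1) n = r :=
          le_antisymm (hl ▸ floordiv_anti hn (by omega : lo ≤ lo + 1))
                      (hr ▸ floordiv_anti hn (by omega : lo + 1 ≤ hi))
        have e3 := mod_of_fd hfd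
        have := ih (lo + 1) hi (by omega) hfd hr
        rwa [show PySem.Int.mod (lo + 1) n = PySem.Int.mod lo n + 1 from by omega] at this

theorem solution_eq_neg_row (n left right : Int) (hn : n < 0)
    (hc : PySem.Int.floordiv left n = PySem.Int.floordiv right n) :
    solution n left right = solution_alt n left right := by
  simp only [solution, solution_alt]
  rw [if_pos hc, foldA, List.nil_append]
  exact (span_neg n (PySem.Int.floordiv left n) hn (right + 1 - left).toNat left right rfl rfl hc.symm).symm

-- ===== VERDICT (by name: the statements are the Claim_ definitions above) =====
theorem solution_spec : Claim_unchanged_solution := by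
  intro n left right _ hpre hnd
  rcases hpre with hn | ⟨hn, hc | ⟨hlr, hm⟩⟩
  · have hrlrr : left / n ≤ right / n := by
      by_contra h
      push_neg at h
      have hlr : right < left := by
        by_contra h2
        push_neg at h2
        exact absurd (Int.ediv_le_ediv hn h2) (not_le.mpr h)
      exact hnd ⟨hlr, by simpa [PySem.Int.floordiv_eq_ediv_of_pos hn] using h⟩
    exact solution_eq n left right hn hrlrr
  · exact solution_eq_neg_row n left right hn hc
  · exact solution_eq_neg n left right hn hlr hm

theorem solution_changed : Claim_changed_solution := by
  unfold Claim_changed_solution; decide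

theorem solution_tight : Claim_exact_solution := by
  intro n left right _ hpre hD
  obtain ⟨hlr, hdiv⟩ := hD
  rcases hpre with hn | ⟨hn, -⟩
  · rw [PySem.Int.floordiv_eq_ediv_of_pos hn, PySem.Int.floordiv_eq_ediv_of_pos hn] at hdiv
    have hcr0 : 0 ≤ right % n := Int.emod_nonneg _ (ne_of_gt hn)
    unfold solution solution_alt
    simp only [PySem.Int.floordiv_eq_ediv_of_pos hn, PySem.Int.mod_eq_emod_of_pos hn]
    rw [if_neg (by omega : ¬ left / n = right / n), foldA,
        PySem.List.pyRange_one_eq_nil (by omega : right + 1 ≤ left),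
        PySem.List.pyRange_one_cons (by omega : (0 : Int) < right % n + 1)]
    simp
  · exfalso
    have h1 := PySem.Int.floordiv_mul_add_mod left n
    have h2 := PySem.Int.floordiv_mul_add_mod right n
    have hb1 := PySem.Int.mod_neg_bounds (a := left) hn
    have hb2 := PySem.Int.mod_neg_bounds (a := right) hn
    have hmul : PySem.Int.floordiv left n * n ≤ (PySem.Int.floordiv right n + 1) * n :=
      mul_le_mul_of_nonpos_right (by omega) hn.le
    have hx : (PySem.Int.floordiv right n + 1) * n = PySem.Int.floordiv right n * n + n := by ring
    linarith
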